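-- pv_equiv track=rewrite | github.com/songzeballboy/Using_MT_metrics_for_paraphrase_identification | code/data-pre/meteor-feature.py | wordnet_word_matches
-- ===== SOURCE A (Python) =====
-- def wordnet_word_matches(h, ref, bitvec_h, bitvec_ref):
--     count = 0
--     for i, syns in enumerate(h):
--         if not bitvec_h[i]:
--             for j, ref_syn in enumerate(ref):
--                 if not bitvec_ref[j]:
--                     if check_syns(syns, ref_syn):
--                         count += 1
--                         bitvec_ref[j] = True
--                         bitvec_h[i] = True
--                         break
--     return (count, bitvec_h, bitvec_ref)
--
-- def check_syns(h, ref):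
--     for synset in h:
--         if synset in ref:
--             return True
--     return False
-- ===== SOURCE B (Python) =====
-- def wordnet_word_matches(h, ref, bitvec_h, bitvec_ref):
--     # Inverted index: synset -> ascending list of still-candidate ref indices
--     # (alternative traversal: per-synset candidate lists instead of scanning ref per word).
--     # Mutates bitvec_h and bitvec_ref in place, like the original.
--     index = {}
--     for j, ref_syn in enumerate(ref):
--         if not bitvec_ref[j]:
--             for s in ref_syn:
--                 index.setdefault(s, []).append(j)
--     matched = [False] * len(ref)
--     count = 0
--     for i, syns in enumerate(h):
--         if not bitvec_h[i]:
--             best = -1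
--             for s in syns:
--                 lst = index.get(s)
--                 if lst:
--                     while lst and matched[lst[0]]:
--                         lst.pop(0)
--                     if lst and (best == -1 or lst[0] < best):
--                         best = lst[0]
--             if best != -1:
--                 count += 1
--                 matched[best] = True
--                 bitvec_ref[best] = True
--                 bitvec_h[i] = True
--     return (count, bitvec_h, bitvec_ref)
-- ===== Notes on version B (the rewrite author's own statement) =====
-- stated objective: alternative
-- what changed: Replaces the nested hypothesis x reference scan (with a linear synset-membership test inside) by an inverted index synset -> ascending list of candidate reference indices built once; each hypothesis word takes the minimum head of its synsets' lists, popping already-matched heads lazily.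
-- outside the precondition, e.g. on wordnet_word_matches([['a']], [['a'], ['b']], [False], [False]): A returns (1, [True], [True]), B raises IndexError
import Mathlib
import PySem

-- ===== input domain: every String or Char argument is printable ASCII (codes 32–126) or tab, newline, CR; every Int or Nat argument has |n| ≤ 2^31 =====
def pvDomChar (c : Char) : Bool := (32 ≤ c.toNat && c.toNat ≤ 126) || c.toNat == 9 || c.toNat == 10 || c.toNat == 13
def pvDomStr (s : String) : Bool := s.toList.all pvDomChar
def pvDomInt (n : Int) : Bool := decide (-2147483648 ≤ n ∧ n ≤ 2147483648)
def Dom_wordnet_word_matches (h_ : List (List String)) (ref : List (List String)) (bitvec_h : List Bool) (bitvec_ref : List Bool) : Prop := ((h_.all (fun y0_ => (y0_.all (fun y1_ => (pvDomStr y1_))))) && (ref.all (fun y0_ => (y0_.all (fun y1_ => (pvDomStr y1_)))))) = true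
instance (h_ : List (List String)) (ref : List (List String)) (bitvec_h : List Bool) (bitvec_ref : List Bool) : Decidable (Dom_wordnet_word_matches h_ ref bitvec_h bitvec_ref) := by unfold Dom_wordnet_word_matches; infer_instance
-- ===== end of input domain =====

-- B replaces A's nested hypothesis×reference scan by an inverted index synset → ascending candidate
-- reference indices (objective: alternative). Both A and B mutate bitvec_h/bitvec_ref in place in Python;
-- the equivalence proved here is about the returned triple.

-- ===== PORT A =====
def check_syns : List String → List String → Bool
  | [], _ => false
  | s :: rest, ref => if ref.contains s then true else check_syns rest ref

-- inner loop of A: first reference index j (from j0, scanning l = remaining refs) that is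
-- unmatched in br and shares a synset
def pvFindA (syns : List String) (br : List Bool) : List (List String) → Nat → Option Nat
  | [], _ => none
  | r :: rest, j =>
    if !(br.getD j false) then
      if check_syns syns r then some j else pvFindA syns br rest (j + 1)
    else pvFindA syns br rest (j + 1)

def pvLoopA (ref : List (List String)) : List (List String) → Nat → Int → List Bool → List Bool → Int × List Bool × List Bool
  | [], _, count, bh, br => (count, bh, br)
  | syns :: rest, i, count, bh, br =>
    if !(bh.getD i false) then
      match pvFindA syns br ref 0 with
      | some j => pvLoopA ref rest (i + 1) (count + 1) (bh.set i true) (br.set j true)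
      | none => pvLoopA ref rest (i + 1) count bh br
    else pvLoopA ref rest (i + 1) count bh br

def wordnet_word_matches (h_ : List (List String)) (ref : List (List String)) (bitvec_h : List Bool) (bitvec_ref : List Bool) : Int × List Bool × List Bool :=
  pvLoopA ref h_ 0 0 bitvec_h bitvec_ref

-- ===== PORT B =====
-- index.setdefault(s, []).append(j) for each s in ref_syn
def pvAddAll (j : Nat) : List String → PySem.Dict String (List Nat) → PySem.Dict String (List Nat)
  | [], idx => idx
  | s :: rest, idx => pvAddAll j rest (idx.insert s (idx.getD s [] ++ [j]))

def pvBuild (br : List Bool) : List (List String) → Nat → PySem.Dict String (List Nat) → PySem.Dict String (List Nat)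
  | [], _, idx => idx
  | r :: rest, j, idx =>
    pvBuild br rest (j + 1) (if !(br.getD j false) then pvAddAll j r idx else idx)

-- while lst and matched[lst[0]]: lst.pop(0)
def pvPop (matched : List Bool) : List Nat → List Nat
  | [] => []
  | j :: rest => if matched.getD j false then pvPop matched rest else j :: rest

-- the per-hypothesis-word scan over syns, threading the (mutated) index; best = -1 is Option.none
def pvBest (matched : List Bool) : List String → PySem.Dict String (List Nat) → Option Nat → PySem.Dict String (List Nat) × Option Nat
  | [], idx, best => (idx, best)
  | s :: rest, idx, best =>
    match idx.get? s with
    | none => pvBest matched rest idx best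
    | some [] => pvBest matched rest idx best
    | some (a :: t) =>
      let lst' := pvPop matched (a :: t)
      let idx' := idx.insert s lst'
      match lst' with
      | [] => pvBest matched rest idx' best
      | j :: _ =>
        pvBest matched rest idx'
          (some (match best with | none => j | some b => if j < b then j else b))

def pvLoopB : List (List String) → Nat → Int → List Bool → List Bool → List Bool → PySem.Dict String (List Nat) → Int × List Bool × List Bool
  | [], _, count, bh, br, _, _ => (count, bh, br)
  | syns :: rest, i, count, bh, br, matched, idx =>
    if !(bh.getD i false) then
      match pvBest matched syns idx none with
      | (idx', some j) =>
        pvLoopB rest (i + 1) (count + 1) (bh.set i true) (br.set j true) (matched.set j true) idx'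
      | (idx', none) => pvLoopB rest (i + 1) count bh br matched idx'
    else pvLoopB rest (i + 1) count bh br matched idx

def wordnet_word_matches_alt (h_ : List (List String)) (ref : List (List String)) (bitvec_h : List Bool) (bitvec_ref : List Bool) : Int × List Bool × List Bool :=
  pvLoopB h_ 0 0 bitvec_h bitvec_ref (List.replicate ref.length false) (pvBuild bitvec_ref ref 0 PySem.Dict.empty)

-- ===== PRECONDITION & SPEC =====
-- Pre_ excludes bit vectors shorter than their token lists, on which Python A raises IndexError
-- (except when every inner scan happens to break early — there A returns but B's index build raises).
def Pre_wordnet_word_matches (h_ : List (List String)) (ref : List (List String)) (bitvec_h : List Bool) (bitvec_ref : List Bool) : Prop :=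
  h_.length ≤ bitvec_h.length ∧ ref.length ≤ bitvec_ref.length
instance (h_ : List (List String)) (ref : List (List String)) (bitvec_h : List Bool) (bitvec_ref : List Bool) : Decidable (Pre_wordnet_word_matches h_ ref bitvec_h bitvec_ref) := by unfold Pre_wordnet_word_matches; infer_instance

def pvWitness_wordnet_word_matches : List (List String) × List (List String) × List Bool × List Bool :=
  ([["a"]], [["a"]], [false], [false])

def Spec_wordnet_word_matches (h_ : List (List String)) (ref : List (List String)) (bitvec_h : List Bool) (bitvec_ref : List Bool) (out : Int × List Bool × List Bool) : Prop := out = wordnet_word_matches_alt h_ ref bitvec_h bitvec_ref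
instance (h_ : List (List String)) (ref : List (List String)) (bitvec_h : List Bool) (bitvec_ref : List Bool) (out : Int × List Bool × List Bool) : Decidable (Spec_wordnet_word_matches h_ ref bitvec_h bitvec_ref out) := by unfold Spec_wordnet_word_matches; infer_instance

-- ===== CLAIM (what is proved, stated in full; the proofs are below) =====
def Claim_equal_wordnet_word_matches : Prop := ∀ (h_ : List (List String)) (ref : List (List String)) (bitvec_h : List Bool) (bitvec_ref : List Bool), Dom_wordnet_word_matches h_ ref bitvec_h bitvec_ref → Pre_wordnet_word_matches h_ ref bitvec_h bitvec_ref → Spec_wordnet_word_matches h_ ref bitvec_h bitvec_ref (wordnet_word_matches h_ ref bitvec_h bitvec_ref)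

-- ===== LEMMAS AND PROOFS =====

-- the predicate A's inner loop searches for (against the CURRENT bitvec br)
def pvQ (syns : List String) (ref : List (List String)) (br : List Bool) (k : Nat) : Prop :=
  k < ref.length ∧ br.getD k false = false ∧ ∃ s ∈ syns, s ∈ ref.getD k []

-- per-synset variant against the ORIGINAL bitvec br0 plus B's matched array
def pvQs (s : String) (ref : List (List String)) (br0 matched : List Bool) (k : Nat) : Prop :=
  k < ref.length ∧ br0.getD k false = false ∧ matched.getD k false = false ∧ s ∈ ref.getD k []

def pvOptLeast (P : Nat → Prop) : Option Nat → Prop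
  | some j => P j ∧ ∀ k, P k → j ≤ k
  | none => ∀ k, ¬ P k

-- B's index invariant: each list is sorted, sound, and complete for unmatched indices
def pvInv (ref : List (List String)) (br0 matched : List Bool) (idx : PySem.Dict String (List Nat)) : Prop :=
  ∀ s : String,
    ((idx.getD s []).Pairwise (· ≤ ·)) ∧
    (∀ j ∈ idx.getD s [], j < ref.length ∧ br0.getD j false = false ∧ s ∈ ref.getD j []) ∧
    (∀ j, j < ref.length → br0.getD j false = false → s ∈ ref.getD j [] →
      matched.getD j false = false → j ∈ idx.getD s [])

theorem pvOptLeast_unique {P : Nat → Prop} {o₁ o₂ : Option Nat}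
    (h₁ : pvOptLeast P o₁) (h₂ : pvOptLeast P o₂) : o₁ = o₂ := by
  cases o₁ <;> cases o₂ <;> simp [pvOptLeast] at *
  · exact absurd h₂.1 (h₁ _)
  · exact absurd h₁.1 (h₂ _)
  · exact le_antisymm (h₁.2 _ h₂.1) (h₂.2 _ h₁.1)

theorem pvOptLeast_congr {P P' : Nat → Prop} {o : Option Nat}
    (h : ∀ k, P k ↔ P' k) (ho : pvOptLeast P o) : pvOptLeast P' o := by
  cases o <;> simp [pvOptLeast] at *
  · exact fun k => (h k).not.mp (ho k)
  · exact ⟨(h _).mp ho.1, fun k hk => ho.2 k ((h k).mpr hk)⟩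

theorem check_syns_iff (l r : List String) : check_syns l r = true ↔ ∃ s ∈ l, s ∈ r := by
  induction l with
  | nil => simp [check_syns]
  | cons x rest ih => by_cases hx : x ∈ r <;> simp [check_syns, hx, ih]

theorem pvFindA_from (syns : List String) (br : List Bool) (ref : List (List String)) :
    ∀ (l : List (List String)) (j0 : Nat), ref.drop j0 = l →
      (∀ j, pvFindA syns br l j0 = some j →
        j0 ≤ j ∧ pvQ syns ref br j ∧ ∀ k, j0 ≤ k → pvQ syns ref br k → j ≤ k) ∧
      (pvFindA syns br l j0 = none → ∀ k, j0 ≤ k → ¬ pvQ syns ref br k) := by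
  intro l
  induction l with
  | nil =>
    intro j0 hd
    refine ⟨by simp [pvFindA], ?_⟩
    intro _ k hk hQ
    have hlen : ref.length ≤ j0 := List.drop_eq_nil_iff.mp hd
    exact absurd hQ.1 (by omega)
  | cons r rest ih =>
    intro j0 hd
    have hj0 : j0 < ref.length := by
      by_contra hc
      rw [List.drop_eq_nil_of_le (by omega)] at hd
      simp at hd
    have hr : ref.getD j0 [] = r := by
      have : (ref.drop j0)[0]? = some r := by rw [hd]; rfl
      rw [List.getElem?_drop] at this
      simp only [Nat.add_zero] at this
      simp [List.getD_eq_getElem?_getD, this]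
    have hrest : ref.drop (j0 + 1) = rest := by
      rw [← List.tail_drop, hd, List.tail_cons]
    have hnotQ : br.getD j0 false = true ∨ check_syns syns r = false → ¬ pvQ syns ref br j0 := by
      rintro (hb | hc) ⟨_, hb', hs⟩
      · rw [hb'] at hb; exact Bool.noConfusion hb
      · rw [hr] at hs
        rw [(check_syns_iff syns r).mpr hs] at hc; exact Bool.noConfusion hc
    by_cases hb : br.getD j0 false
    · -- bitvec_ref[j0] is set: skip
      have hstep : pvFindA syns br (r :: rest) j0 = pvFindA syns br rest (j0 + 1) := by
        simp only [pvFindA]; rw [hb]; simp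
      obtain ⟨ihs, ihn⟩ := ih (j0 + 1) hrest
      rw [hstep]
      refine ⟨fun j hj => ?_, fun hn k hk hQ => ?_⟩
      · obtain ⟨h1, h2, h3⟩ := ihs j hj
        exact ⟨by omega, h2, fun k hk hQ => by
          rcases Nat.eq_or_lt_of_le hk with h | h
          · exact absurd (h ▸ hQ) (hnotQ (Or.inl hb))
          · exact h3 k h hQ⟩
      · rcases Nat.eq_or_lt_of_le hk with h | h
        · exact absurd (h ▸ hQ) (hnotQ (Or.inl hb))
        · exact ihn hn k h hQ
    · by_cases hc : check_syns syns r
      · have hb' : br.getD j0 false = false := by simpa using hb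
        have hstep : pvFindA syns br (r :: rest) j0 = some j0 := by
          simp only [pvFindA]; rw [hb', hc]; simp
        rw [hstep]
        refine ⟨fun j hj => ?_, fun hn => by simp at hn⟩
        obtain rfl : j0 = j := Option.some.inj hj
        refine ⟨le_refl _, ⟨hj0, by simpa using hb, ?_⟩, fun k hk _ => hk⟩
        rw [hr]; exact (check_syns_iff syns r).mp hc
      · have hb' : br.getD j0 false = false := by simpa using hb
        have hc' : check_syns syns r = false := by simpa using hc
        have hstep : pvFindA syns br (r :: rest) j0 = pvFindA syns br rest (j0 + 1) := by
          simp only [pvFindA]; rw [hb', hc']; simp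
        obtain ⟨ihs, ihn⟩ := ih (j0 + 1) hrest
        rw [hstep]
        refine ⟨fun j hj => ?_, fun hn k hk hQ => ?_⟩
        · obtain ⟨h1, h2, h3⟩ := ihs j hj
          exact ⟨by omega, h2, fun k hk hQ => by
            rcases Nat.eq_or_lt_of_le hk with h | h
            · exact absurd (h ▸ hQ) (hnotQ (Or.inr (by simpa using hc)))
            · exact h3 k h hQ⟩
        · rcases Nat.eq_or_lt_of_le hk with h | h
          · exact absurd (h ▸ hQ) (hnotQ (Or.inr (by simpa using hc)))
          · exact ihn hn k h hQ

theorem pvFindA_spec (syns : List String) (br : List Bool) (ref : List (List String)) :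
    pvOptLeast (pvQ syns ref br) (pvFindA syns br ref 0) := by
  obtain ⟨hs, hn⟩ := pvFindA_from syns br ref ref 0 (by simp)
  cases h : pvFindA syns br ref 0 with
  | none => exact fun k => hn h k (Nat.zero_le k)
  | some j =>
    obtain ⟨_, h2, h3⟩ := hs j h
    exact ⟨h2, fun k hk => h3 k (Nat.zero_le k) hk⟩

theorem pvPop_suffix (matched : List Bool) (l : List Nat) :
    ∃ pre, l = pre ++ pvPop matched l ∧ ∀ j ∈ pre, matched.getD j false = true := by
  induction l with
  | nil => exact ⟨[], by simp [pvPop]⟩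
  | cons a rest ih =>
    by_cases ha : matched.getD a false
    · obtain ⟨pre, h1, h2⟩ := ih
      refine ⟨a :: pre, ?_, ?_⟩
      · have hred : pvPop matched (a :: rest) = pvPop matched rest := by
          simp only [pvPop]; rw [if_pos ha]
        rw [hred, List.cons_append, ← h1]
      · intro j hj
        rcases List.mem_cons.mp hj with rfl | hj
        · exact ha
        · exact h2 j hj
    · have hred : pvPop matched (a :: rest) = a :: rest := by
        simp only [pvPop]; rw [if_neg ha]
      exact ⟨[], by rw [hred, List.nil_append], by simp⟩

theorem pvPop_head (matched : List Bool) (l : List Nat) (j : Nat) (t : List Nat)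
    (h : pvPop matched l = j :: t) : matched.getD j false = false := by
  induction l with
  | nil => simp [pvPop] at h
  | cons a rest ih =>
    by_cases ha : matched.getD a false
    · rw [pvPop, if_pos ha] at h; exact ih h
    · rw [pvPop, if_neg ha] at h
      obtain rfl := (List.cons.injEq _ _ _ _ ▸ h).1
      simpa using ha

def pvComb (best : Option Nat) (j : Nat) : Nat :=
  match best with | none => j | some b => if j < b then j else b

theorem pvBest_spec (ref : List (List String)) (br0 matched : List Bool) :
    ∀ (syns : List String) (idx : PySem.Dict String (List Nat)) (best : Option Nat)
      (P0 : Nat → Prop), pvInv ref br0 matched idx → pvOptLeast P0 best →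
    pvInv ref br0 matched (pvBest matched syns idx best).1 ∧
    pvOptLeast (fun k => P0 k ∨ ∃ s ∈ syns, pvQs s ref br0 matched k)
      (pvBest matched syns idx best).2 := by
  intro syns
  induction syns with
  | nil =>
    intro idx best P0 hinv hb
    have hred : pvBest matched [] idx best = (idx, best) := rfl
    rw [hred]
    exact ⟨hinv, pvOptLeast_congr (fun k => by simp) hb⟩
  | cons s rest ih =>
    intro idx best P0 hinv hb
    have hmerge : ∀ (o : Option Nat), (∀ k, ¬ pvQs s ref br0 matched k) →
        pvOptLeast (fun k => P0 k ∨ ∃ s' ∈ rest, pvQs s' ref br0 matched k) o →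
        pvOptLeast (fun k => P0 k ∨ ∃ s' ∈ s :: rest, pvQs s' ref br0 matched k) o := by
      intro o hQs ho
      refine pvOptLeast_congr (fun k => ?_) ho
      constructor
      · rintro (h | ⟨s', hs', hq⟩)
        · exact Or.inl h
        · exact Or.inr ⟨s', List.mem_cons_of_mem _ hs', hq⟩
      · rintro (h | ⟨s', hs', hq⟩)
        · exact Or.inl h
        · rcases List.mem_cons.mp hs' with rfl | hs'
          · exact absurd hq (hQs k)
          · exact Or.inr ⟨s', hs', hq⟩
    cases hg : idx.get? s with
    | none =>
      have hL : idx.getD s [] = [] := by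
        rw [PySem.Dict.getD_eq_get?_getD, hg]; rfl
      have hQs : ∀ k, ¬ pvQs s ref br0 matched k := by
        rintro k ⟨h1, h2, h3, h4⟩
        have := (hinv s).2.2 k h1 h2 h4 h3
        rw [hL] at this; simp at this
      have hstep : pvBest matched (s :: rest) idx best = pvBest matched rest idx best := by
        simp only [pvBest]; rw [hg]
      rw [hstep]
      obtain ⟨hi, ho⟩ := ih idx best P0 hinv hb
      exact ⟨hi, hmerge _ hQs ho⟩
    | some L =>
      have hL : idx.getD s [] = L := PySem.Dict.getD_of_get?_eq_some idx [] hg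
      cases L with
      | nil =>
        have hQs : ∀ k, ¬ pvQs s ref br0 matched k := by
          rintro k ⟨h1, h2, h3, h4⟩
          have := (hinv s).2.2 k h1 h2 h4 h3
          rw [hL] at this; simp at this
        have hstep : pvBest matched (s :: rest) idx best = pvBest matched rest idx best := by
          simp only [pvBest]; rw [hg]
        rw [hstep]
        obtain ⟨hi, ho⟩ := ih idx best P0 hinv hb
        exact ⟨hi, hmerge _ hQs ho⟩
      | cons a t =>
        obtain ⟨pre, hsplit, hpre⟩ := pvPop_suffix matched (a :: t)
        have hinv' : pvInv ref br0 matched (idx.insert s (pvPop matched (a :: t))) := by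
          intro s'
          by_cases hss : s' = s
          · subst hss
            rw [PySem.Dict.getD_insert_self]
            refine ⟨?_, ?_, ?_⟩
            · have hp : (idx.getD s' []).Pairwise (· ≤ ·) := (hinv s').1
              rw [hL, hsplit] at hp
              exact hp.sublist (List.sublist_append_right pre _)
            · intro j hj
              have : j ∈ idx.getD s' [] := by
                rw [hL, hsplit]; exact List.mem_append_right pre hj
              exact (hinv s').2.1 j this
            · intro j h1 h2 h3 h4
              have : j ∈ idx.getD s' [] := (hinv s').2.2 j h1 h2 h3 h4
              rw [hL, hsplit] at this
              rcases List.mem_append.mp this with h | h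
              · rw [hpre j h] at h4; exact Bool.noConfusion h4
              · exact h
          · rw [PySem.Dict.getD_insert_of_ne idx _ _ hss]
            exact hinv s'
        cases hpop : pvPop matched (a :: t) with
        | nil =>
          rw [hpop] at hinv' hsplit
          have hQs : ∀ k, ¬ pvQs s ref br0 matched k := by
            rintro k ⟨h1, h2, h3, h4⟩
            have hk : k ∈ idx.getD s [] := (hinv s).2.2 k h1 h2 h4 h3
            rw [hL, hsplit] at hk
            rw [hpre k (by simpa using hk)] at h3; exact Bool.noConfusion h3
          have hstep : pvBest matched (s :: rest) idx best
              = pvBest matched rest (idx.insert s []) best := by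
            simp only [pvBest]; rw [hg]; simp only []; rw [hpop]
          rw [hstep]
          obtain ⟨hi, ho⟩ := ih (idx.insert s []) best P0 hinv' hb
          exact ⟨hi, hmerge _ hQs ho⟩
        | cons j t' =>
          rw [hpop] at hinv' hsplit
          have hmj : matched.getD j false = false := pvPop_head matched (a :: t) j t' hpop
          have hQsj : pvQs s ref br0 matched j := by
            have hj : j ∈ idx.getD s [] := by
              rw [hL, hsplit]; exact List.mem_append_right pre (by simp)
            obtain ⟨h1, h2, h3⟩ := (hinv s).2.1 j hj
            exact ⟨h1, h2, hmj, h3⟩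
          have hleast : ∀ k, pvQs s ref br0 matched k → j ≤ k := by
            rintro k ⟨h1, h2, h3, h4⟩
            have hk : k ∈ idx.getD s [] := (hinv s).2.2 k h1 h2 h4 h3
            rw [hL, hsplit] at hk
            rcases List.mem_append.mp hk with h | h
            · rw [hpre k h] at h3; exact Bool.noConfusion h3
            · have hp : (idx.getD s []).Pairwise (· ≤ ·) := (hinv s).1
              rw [hL, hsplit] at hp
              have hp' : (j :: t').Pairwise (· ≤ ·) :=
                hp.sublist (List.sublist_append_right pre _)
              rcases List.mem_cons.mp h with rfl | h
              · exact le_refl k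
              · exact List.rel_of_pairwise_cons hp' h
          have hb' : pvOptLeast (fun k => P0 k ∨ pvQs s ref br0 matched k)
              (some (pvComb best j)) := by
            cases best with
            | none =>
              simp only [pvComb]
              exact ⟨Or.inr hQsj, fun k hk => hk.elim (fun h => absurd h (hb k)) (hleast k)⟩
            | some b =>
              obtain ⟨hPb, hmin⟩ := hb
              simp only [pvComb]
              by_cases hjb : j < b
              · simp only [if_pos hjb]
                exact ⟨Or.inr hQsj, fun k hk =>
                  hk.elim (fun h => le_trans (le_of_lt hjb) (hmin k h)) (hleast k)⟩
              · simp only [if_neg hjb]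
                exact ⟨Or.inl hPb, fun k hk =>
                  hk.elim (hmin k) (fun h => le_trans (Nat.le_of_not_lt hjb) (hleast k h))⟩
          have hstep : pvBest matched (s :: rest) idx best
              = pvBest matched rest (idx.insert s (j :: t'))
                  (some (pvComb best j)) := by
            simp only [pvBest]; rw [hg]; simp only []; rw [hpop]; rfl
          rw [hstep]
          obtain ⟨hi, ho⟩ := ih (idx.insert s (j :: t'))
            (some (pvComb best j))
            (fun k => P0 k ∨ pvQs s ref br0 matched k) hinv' hb'
          refine ⟨hi, pvOptLeast_congr (fun k => ?_) ho⟩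
          simp only [List.mem_cons]
          constructor
          · rintro ((h | h) | ⟨s', hs', hq⟩)
            · exact Or.inl h
            · exact Or.inr ⟨s, Or.inl rfl, h⟩
            · exact Or.inr ⟨s', Or.inr hs', hq⟩
          · rintro (h | ⟨s', rfl | hs', hq⟩)
            · exact Or.inl (Or.inl h)
            · exact Or.inl (Or.inr hq)
            · exact Or.inr ⟨s', hs', hq⟩

theorem pvGetD_set_self (l : List Bool) (j : Nat) (a d : Bool) (h : j < l.length) :
    (l.set j a).getD j d = a := by
  simp [List.getD_eq_getElem?_getD, List.getElem?_set, h]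

theorem pvGetD_set_ne (l : List Bool) (j k : Nat) (a d : Bool) (h : k ≠ j) :
    (l.set j a).getD k d = l.getD k d := by
  have h' : j ≠ k := fun hc => h hc.symm
  simp [List.getD_eq_getElem?_getD, List.getElem?_set, h']

theorem pvLoop_eq (ref : List (List String)) (br0 : List Bool) :
    ∀ (hs : List (List String)) (i : Nat) (count : Int) (bh br matched : List Bool)
      (idx : PySem.Dict String (List Nat)),
      ref.length ≤ br.length → matched.length = ref.length →
      (∀ k, br.getD k false = (br0.getD k false || matched.getD k false)) →
      pvInv ref br0 matched idx →
      pvLoopA ref hs i count bh br = pvLoopB hs i count bh br matched idx := by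
  intro hs
  induction hs with
  | nil => intro i count bh br matched idx _ _ _ _; rfl
  | cons syns rest ih =>
    intro i count bh br matched idx hlen hmlen hover hinv
    by_cases hbh : bh.getD i false
    · have hA : pvLoopA ref (syns :: rest) i count bh br
          = pvLoopA ref rest (i + 1) count bh br := by
        simp only [pvLoopA]; rw [hbh]; simp
      have hB : pvLoopB (syns :: rest) i count bh br matched idx
          = pvLoopB rest (i + 1) count bh br matched idx := by
        simp only [pvLoopB]; rw [hbh]; simp
      rw [hA, hB]; exact ih _ _ _ _ _ _ hlen hmlen hover hinv
    · have hbh' : bh.getD i false = false := by simpa using hbh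
      obtain ⟨hinv', hbl⟩ := pvBest_spec ref br0 matched syns idx none (fun _ => False)
        hinv (fun k h => h)
      have hQiff : ∀ k, (False ∨ ∃ s ∈ syns, pvQs s ref br0 matched k) ↔ pvQ syns ref br k := by
        intro k
        simp only [pvQ, pvQs, false_or, hover k, Bool.or_eq_false_iff]
        constructor
        · rintro ⟨s, hs, h1, h2, h3, h4⟩
          exact ⟨h1, ⟨h2, h3⟩, s, hs, h4⟩
        · rintro ⟨h1, ⟨h2, h3⟩, s, hs, h4⟩
          exact ⟨s, hs, h1, h2, h3, h4⟩
      have heq : pvFindA syns br ref 0 = (pvBest matched syns idx none).2 :=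
        pvOptLeast_unique (pvFindA_spec syns br ref) (pvOptLeast_congr hQiff hbl)
      cases hp : pvBest matched syns idx none with
      | mk idx' o =>
        rw [hp] at hinv' hbl heq
        cases o with
        | none =>
          have hA : pvLoopA ref (syns :: rest) i count bh br
              = pvLoopA ref rest (i + 1) count bh br := by
            simp only [pvLoopA]; rw [hbh', heq]; simp
          have hB : pvLoopB (syns :: rest) i count bh br matched idx
              = pvLoopB rest (i + 1) count bh br matched idx' := by
            simp only [pvLoopB]; rw [hbh', hp]; simp
          rw [hA, hB]
          exact ih _ _ _ _ _ _ hlen hmlen hover hinv'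
        | some j =>
          have hQj : pvQ syns ref br j := ((pvOptLeast_congr hQiff hbl)).1
          have hjref : j < ref.length := hQj.1
          have hbrj : br.getD j false = false := hQj.2.1
          have hA : pvLoopA ref (syns :: rest) i count bh br
              = pvLoopA ref rest (i + 1) (count + 1) (bh.set i true) (br.set j true) := by
            simp only [pvLoopA]; rw [hbh', heq]; simp
          have hB : pvLoopB (syns :: rest) i count bh br matched idx
              = pvLoopB rest (i + 1) (count + 1) (bh.set i true) (br.set j true)
                  (matched.set j true) idx' := by
            simp only [pvLoopB]; rw [hbh', hp]; simp
          rw [hA, hB]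
          have hmj : matched.getD j false = false := by
            have := hover j
            rw [hbrj] at this
            exact (Bool.or_eq_false_iff.mp this.symm).2
          apply ih
          · simpa using hlen
          · simpa using hmlen
          · intro k
            by_cases hkj : k = j
            · subst hkj
              rw [pvGetD_set_self br k true false (by omega),
                pvGetD_set_self matched k true false (by omega)]
              simp
            · rw [pvGetD_set_ne br j k true false hkj, pvGetD_set_ne matched j k true false hkj]
              exact hover k
          · intro s
            obtain ⟨hh1, hh2, hh3⟩ := hinv' s
            refine ⟨hh1, hh2, ?_⟩
            intro k hk1 hk2 hk3 hk4
            apply hh3 k hk1 hk2 hk3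
            by_cases hkj : k = j
            · subst hkj
              rw [pvGetD_set_self matched k true false (by omega)] at hk4
              exact Bool.noConfusion hk4
            · rw [pvGetD_set_ne matched j k true false hkj] at hk4
              exact hk4

theorem pvAddAll_getD (j : Nat) :
    ∀ (r : List String) (idx : PySem.Dict String (List Nat)) (s : String),
      (pvAddAll j r idx).getD s [] = idx.getD s [] ++ List.replicate (r.count s) j := by
  intro r
  induction r with
  | nil => intro idx s; simp [pvAddAll]
  | cons x rest ih =>
    intro idx s
    have hstep : pvAddAll j (x :: rest) idx
        = pvAddAll j rest (idx.insert x (idx.getD x [] ++ [j])) := rfl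
    rw [hstep, ih]
    by_cases hsx : s = x
    · subst hsx
      rw [PySem.Dict.getD_insert_self]
      rw [List.count_cons, if_pos (by simp)]
      rw [List.append_assoc]
      congr 1
    · rw [PySem.Dict.getD_insert_of_ne idx _ _ hsx]
      rw [List.count_cons, if_neg (by simp; exact fun h => hsx h.symm)]
      simp

-- partial invariant of the index after the first m reference words have been processed
def pvInvUpTo (ref : List (List String)) (br0 : List Bool) (m : Nat)
    (idx : PySem.Dict String (List Nat)) : Prop :=
  ∀ s : String,
    ((idx.getD s []).Pairwise (· ≤ ·)) ∧
    (∀ j ∈ idx.getD s [], j < m ∧ br0.getD j false = false ∧ s ∈ ref.getD j []) ∧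
    (∀ j, j < m → br0.getD j false = false → s ∈ ref.getD j [] → j ∈ idx.getD s [])

theorem pvBuild_inv (ref : List (List String)) (br0 : List Bool) :
    ∀ (l : List (List String)) (j0 : Nat) (idx : PySem.Dict String (List Nat)),
      ref.drop j0 = l → j0 ≤ ref.length → pvInvUpTo ref br0 j0 idx →
      pvInvUpTo ref br0 ref.length (pvBuild br0 l j0 idx) := by
  intro l
  induction l with
  | nil =>
    intro j0 idx hd hle hup
    have : ref.length = j0 := le_antisymm (List.drop_eq_nil_iff.mp hd) hle
    rw [this]
    exact hup
  | cons r rest ih =>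
    intro j0 idx hd hle hup
    have hj0 : j0 < ref.length := by
      by_contra hc
      rw [List.drop_eq_nil_of_le (by omega)] at hd
      simp at hd
    have hr : ref.getD j0 [] = r := by
      have : (ref.drop j0)[0]? = some r := by rw [hd]; rfl
      rw [List.getElem?_drop] at this
      simp only [Nat.add_zero] at this
      simp [List.getD_eq_getElem?_getD, this]
    have hrest : ref.drop (j0 + 1) = rest := by
      rw [← List.tail_drop, hd, List.tail_cons]
    have hstep : pvBuild br0 (r :: rest) j0 idx
        = pvBuild br0 rest (j0 + 1) (if !(br0.getD j0 false) then pvAddAll j0 r idx else idx) :=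
      rfl
    rw [hstep]
    apply ih (j0 + 1) _ hrest (by omega)
    by_cases hb : br0.getD j0 false
    · rw [if_neg (by rw [hb]; simp)]
      intro s
      obtain ⟨h1, h2, h3⟩ := hup s
      refine ⟨h1, fun j hj => ?_, fun j hja hjb hjc => ?_⟩
      · obtain ⟨ha, hbb, hc⟩ := h2 j hj
        exact ⟨by omega, hbb, hc⟩
      · rcases Nat.lt_succ_iff_lt_or_eq.mp hja with h | rfl
        · exact h3 j h hjb hjc
        · rw [hjb] at hb; exact Bool.noConfusion hb
    · have hb' : br0.getD j0 false = false := by simpa using hb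
      rw [if_pos (by rw [hb']; simp)]
      intro s
      obtain ⟨h1, h2, h3⟩ := hup s
      rw [pvAddAll_getD j0 r idx s]
      refine ⟨?_, ?_, ?_⟩
      · rw [List.pairwise_append]
        refine ⟨h1, List.pairwise_replicate.mpr (Or.inr (le_refl j0)), ?_⟩
        intro a ha b hb2
        obtain rfl := (List.mem_replicate.mp hb2).2
        exact le_of_lt (h2 a ha).1
      · intro j hj
        rcases List.mem_append.mp hj with h | h
        · obtain ⟨ha, hbb, hc⟩ := h2 j h
          exact ⟨by omega, hbb, hc⟩
        · obtain ⟨hcnt, rfl⟩ := List.mem_replicate.mp h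
          refine ⟨by omega, hb', ?_⟩
          rw [hr]
          exact List.count_pos_iff.mp (Nat.pos_of_ne_zero hcnt)
      · intro j hja hjb hjc
        rcases Nat.lt_succ_iff_lt_or_eq.mp hja with h | rfl
        · exact List.mem_append_left _ (h3 j h hjb hjc)
        · apply List.mem_append_right
          apply List.mem_replicate.mpr
          refine ⟨?_, rfl⟩
          rw [hr] at hjc
          have := List.count_pos_iff.mpr hjc
          omega

theorem pvReplicate_getD (n k : Nat) : (List.replicate n false).getD k false = false := by
  rcases Nat.lt_or_ge k n with h | h
  · simp [List.getD_eq_getElem?_getD, List.getElem?_replicate, h]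
  · simp [List.getD_eq_getElem?_getD, List.getElem?_replicate, Nat.not_lt.mpr h]

-- ===== VERDICT (by name: the statement is the Claim_ definition above) =====
theorem wordnet_word_matches_spec : Claim_equal_wordnet_word_matches := by
  intro h_ ref bh br _hdom hpre
  unfold Spec_wordnet_word_matches wordnet_word_matches wordnet_word_matches_alt
  apply pvLoop_eq ref br h_ 0 0 bh br (List.replicate ref.length false)
    (pvBuild br ref 0 PySem.Dict.empty) hpre.2 (by simp)
  · intro k
    rw [pvReplicate_getD]
    simp
  · have hup : pvInvUpTo ref br ref.length (pvBuild br ref 0 PySem.Dict.empty) := by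
      apply pvBuild_inv ref br ref 0 PySem.Dict.empty (by simp) (by omega)
      intro s
      simp [PySem.Dict.getD_empty]
    intro s
    obtain ⟨h1, h2, h3⟩ := hup s
    refine ⟨h1, h2, ?_⟩
    intro j hja hjb hjc _
    exact h3 j hja hjb hjc
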